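-- pv_equiv track=rewrite | github.com/AvaPrime/docfoundry | server/security/cors.py | validate_origin
-- ===== SOURCE A (Python) =====
-- from typing import List, Optional
--
-- def validate_origin(origin: str, allowed_origins: List[str]) -> bool:
--     """Validate if an origin is allowed."""
--     if "*" in allowed_origins:
--         return True
--
--     # Exact match
--     if origin in allowed_origins:
--         return True
--
--     # Check for wildcard subdomains (e.g., *.example.com)
--     for allowed in allowed_origins:
--         if allowed.startswith("*."):
--             domain = allowed[2:]  # Remove *.
--             if origin.endswith(f".{domain}") or origin == domain:
--                 return True
--
--     return False
-- ===== SOURCE B (Python) =====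
-- def validate_origin(origin, allowed_origins):
--     """Validate if an origin is allowed."""
--     allowed = set(allowed_origins)
--     if "*" in allowed or origin in allowed:
--         return True
--     if "*." + origin in allowed:
--         return True
--     return any(origin[i] == "." and "*." + origin[i + 1:] in allowed
--                for i in range(len(origin)))
-- ===== Notes on version B (the rewrite author's own statement) =====
-- stated objective: alternative
-- what changed: Replaces A's linear scan over wildcard entries (testing origin against each '*.' entry) by building a set of the allowed origins once and probing it with the patterns derivable from the origin itself ('*.'+origin and '*.'+suffix after each dot).
import Mathlib
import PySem

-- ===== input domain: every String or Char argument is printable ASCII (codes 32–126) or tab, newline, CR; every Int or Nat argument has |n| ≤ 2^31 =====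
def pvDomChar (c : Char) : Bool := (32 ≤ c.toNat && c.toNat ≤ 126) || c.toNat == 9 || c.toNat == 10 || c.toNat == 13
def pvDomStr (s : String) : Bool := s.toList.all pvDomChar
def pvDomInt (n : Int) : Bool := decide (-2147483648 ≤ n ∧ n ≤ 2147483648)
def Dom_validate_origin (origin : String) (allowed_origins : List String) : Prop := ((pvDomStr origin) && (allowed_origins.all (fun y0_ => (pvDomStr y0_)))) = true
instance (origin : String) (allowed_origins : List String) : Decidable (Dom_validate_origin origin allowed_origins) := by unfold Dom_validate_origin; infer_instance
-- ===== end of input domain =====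

-- B replaces A's linear scan over wildcard entries by one set of the allowed origins,
-- probed with the patterns derivable from the origin itself (alternative decomposition).

-- ===== PORT A =====
def validate_origin (origin : String) (allowed_origins : List String) : Bool :=
  if allowed_origins.contains "*" then true
  else if allowed_origins.contains origin then true
  else allowed_origins.any (fun allowed =>
    if PySem.Str.startswith allowed "*." then
      let domain := PySem.Str.slice allowed (some 2) none
      PySem.Str.endswith origin (String.ofList ('.' :: domain.toList)) || origin == domain
    else false)

-- ===== PORT B =====
def validate_origin_alt (origin : String) (allowed_origins : List String) : Bool :=
  let allowed := PySem.Set.ofList allowed_origins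
  if allowed.contains "*" || allowed.contains origin then true
  else if allowed.contains (String.ofList ('*' :: '.' :: origin.toList)) then true
  else (PySem.List.pyRange 0 (PySem.Str.len origin) 1).any (fun i =>
    (PySem.Str.pyGet? origin i == some '.') &&
    allowed.contains (String.ofList ('*' :: '.' ::
      (PySem.Str.slice origin (some (i + 1)) none).toList)))

-- ===== PRECONDITION & SPEC =====
def Spec_validate_origin (origin : String) (allowed_origins : List String) (out : Bool) : Prop := out = validate_origin_alt origin allowed_origins
instance (origin : String) (allowed_origins : List String) (out : Bool) : Decidable (Spec_validate_origin origin allowed_origins out) := by unfold Spec_validate_origin; infer_instance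

-- ===== CLAIM (what is proved, stated in full; the proofs are below) =====
def Claim_equal_validate_origin : Prop := ∀ (origin : String) (allowed_origins : List String), Dom_validate_origin origin allowed_origins → Spec_validate_origin origin allowed_origins (validate_origin origin allowed_origins)

-- ===== LEMMAS AND PROOFS =====

-- a string has '.'::d as suffix iff some position i holds '.' and the rest after i is d
lemma suffix_dot_iff (o d : List Char) :
    ('.' :: d) <:+ o ↔ ∃ i : Nat, i < o.length ∧ o[i]? = some '.' ∧ o.drop (i + 1) = d := by
  constructor
  · rintro ⟨t, rfl⟩
    refine ⟨t.length, by simp, ?_, ?_⟩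
    · simp
    · rw [show t ++ '.' :: d = (t ++ ['.']) ++ d by simp,
         show t.length + 1 = (t ++ ['.']).length + 0 by simp,
         List.drop_append]
      simp
  · rintro ⟨i, hi, hget, hdrop⟩
    refine ⟨o.take i, ?_⟩
    have := List.take_append_drop i o
    rw [List.drop_eq_getElem_cons hi] at this
    simp only [List.getElem?_eq_getElem hi, Option.some.injEq] at hget
    rw [hget] at this
    rw [hdrop] at this
    exact this

lemma contains_ofList (L : List String) (x : String) :
    (PySem.Set.ofList L).contains x = L.contains x := by
  rw [Bool.eq_iff_iff]; simp [PySem.Set.mem_ofList]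

lemma slice_two_toList (a : String) :
    (PySem.Str.slice a (some 2) none).toList = a.toList.drop 2 := by
  simp [PySem.Str.toList_slice]; rw [PySem.List.slice_from _ (by norm_num)]; rfl

lemma slice_two (l : List Char) : PySem.List.slice l (some 2) none = l.drop 2 := by
  rw [PySem.List.slice_from _ (by norm_num)]; rfl

lemma slice_succ (l : List Char) (n : Nat) :
    PySem.List.slice l (some ((n : Int) + 1)) none = l.drop (n + 1) := by
  rw [PySem.List.slice_from _ (by positivity), show ((n : Int) + 1).toNat = n + 1 by omega]

-- characterisation of A's per-entry wildcard test
lemma body_iff (o a : String) :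
    ((if PySem.Str.startswith a "*." then
        PySem.Str.endswith o (String.ofList ('.' :: (PySem.Str.slice a (some 2) none).toList))
          || o == PySem.Str.slice a (some 2) none
      else false) = true)
    ↔ ∃ d : List Char, a.toList = '*' :: '.' :: d ∧ (('.' :: d) <:+ o.toList ∨ o.toList = d) := by
  have hsl := slice_two_toList a
  split_ifs with h
  · have hp : ("*." : String).toList <+: a.toList := by
      rw [← PySem.Chars.startswith_iff]; simpa using h
    have hlit : ("*." : String).toList = ['*', '.'] := by decide
    rw [hlit] at hp
    obtain ⟨t, ht⟩ := hp
    have ha : a.toList = '*' :: '.' :: t := by rw [← ht]; rfl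
    have hdrop : a.toList.drop 2 = t := by rw [ha]; rfl
    constructor
    · intro hb
      refine ⟨t, ha, ?_⟩
      rcases Bool.or_eq_true_iff.mp hb with hb | hb
      · left
        have := (PySem.Chars.endswith_iff o.toList _).mp (by simpa using hb)
        simpa [slice_two, hdrop] using this
      · right
        have : o = PySem.Str.slice a (some 2) none := by simpa using hb
        rw [show o.toList = (PySem.Str.slice a (some 2) none).toList by rw [this]]
        rw [hsl, hdrop]
    · rintro ⟨d, hd, hcase⟩
      have htd : t = d := by
        have := ha.symm.trans hd
        simpa using this
      subst htd
      rcases hcase with hc | hc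
      · apply Bool.or_eq_true_iff.mpr; left
        simp only [PySem.Str.endswith_eq]
        rw [PySem.Chars.endswith_iff]
        simpa [hsl, hdrop] using hc
      · apply Bool.or_eq_true_iff.mpr; right
        have : o = PySem.Str.slice a (some 2) none := by
          rw [String.ext_iff, hsl, hdrop]; exact hc
        simpa using this
  · simp only [false_iff]
    rintro ⟨d, hd, -⟩
    apply h
    simp only [PySem.Str.startswith_eq]
    rw [PySem.Chars.startswith_iff, show ("*." : String).toList = ['*', '.'] by decide, hd]
    exact ⟨d, rfl⟩

-- the wildcard loop of A equals B's pattern probes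
lemma wildcard_eq (o : String) (L : List String) :
    (L.any fun allowed =>
      if PySem.Str.startswith allowed "*." then
        PySem.Str.endswith o (String.ofList ('.' :: (PySem.Str.slice allowed (some 2) none).toList))
          || o == PySem.Str.slice allowed (some 2) none
      else false)
    = ((L.contains (String.ofList ('*' :: '.' :: o.toList))) ||
       (PySem.List.pyRange 0 (PySem.Str.len o) 1).any fun i =>
         (PySem.Str.pyGet? o i == some '.') &&
         L.contains (String.ofList ('*' :: '.' ::
           (PySem.Str.slice o (some (i + 1)) none).toList))) := by
  rw [Bool.eq_iff_iff]
  simp only [List.any_eq_true, Bool.or_eq_true, List.contains_iff_mem, Bool.and_eq_true,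
    beq_iff_eq, PySem.List.mem_pyRange_one]
  constructor
  · rintro ⟨a, haL, hb⟩
    obtain ⟨d, hd, hcase⟩ := (body_iff o a).mp hb
    have haeq : ∀ l : List Char, a.toList = l → a = String.ofList l := by
      intro l hl; rw [String.ext_iff]; simpa using hl
    rcases hcase with hc | hc
    · right
      obtain ⟨n, hn, hget, hdrop⟩ := (suffix_dot_iff o.toList d).mp hc
      refine ⟨(n : Int), ⟨by positivity, ?_⟩, ?_, ?_⟩
      · simp [PySem.Str.len_eq]; exact_mod_cast hn
      · simp; exact hget
      · simp only [PySem.Str.toList_slice, PySem.Chars.slice_eq_listSlice, slice_succ]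
        rw [hdrop, ← hd]
        rw [← haeq _ rfl]; exact haL
    · left
      rw [← hc] at hd
      rw [← haeq _ hd]; exact haL
  · rintro (hmem | ⟨i, ⟨hi0, hilen⟩, hget, hmem⟩)
    · refine ⟨_, hmem, (body_iff o _).mpr ⟨o.toList, by simp, Or.inr rfl⟩⟩
    · lift i to ℕ using hi0 with n
      have hn : n < o.toList.length := by
        rw [PySem.Str.len_eq] at hilen; exact_mod_cast hilen
      have hget' : o.toList[n]? = some '.' := by simpa [PySem.Str.pyGet?_natCast] using hget
      have hsl : (PySem.Str.slice o (some ((n : Int) + 1)) none).toList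
          = o.toList.drop (n + 1) := by
        simp [PySem.Str.toList_slice, slice_succ]
      rw [hsl] at hmem
      refine ⟨_, hmem, (body_iff o _).mpr ⟨o.toList.drop (n + 1), by simp, Or.inl ?_⟩⟩
      exact (suffix_dot_iff o.toList _).mpr ⟨n, hn, hget', rfl⟩

-- ===== VERDICT (by name: the statement is the Claim_ definition above) =====
theorem validate_origin_spec : Claim_equal_validate_origin := by
  intro o L _
  show validate_origin o L = validate_origin_alt o L
  unfold validate_origin validate_origin_alt
  simp only [contains_ofList]
  rw [wildcard_eq]
  cases h1 : L.contains "*" <;> cases h2 : L.contains o <;>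
    cases h3 : L.contains (String.ofList ('*' :: '.' :: o.toList)) <;>
      simp_all
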